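-- pv_equiv track=rewrite | github.com/NonsensicalInsane/hackerrank-solutions | 3 Months Preparation Kit/Week_1/camelcase4.py | combined_string
-- ===== SOURCE A (Python) =====
-- def combined_string(txt, initial_case, is_method):
--     flag = initial_case
--     new_txt = ""
--     for letter in txt:
--         if letter == " ":
--             flag = "upper"
--             continue
--         elif flag == "lower":
--             new_txt += letter.lower()
--         elif flag == "upper":
--             new_txt += letter.upper()
--             flag = "lower"
--     if is_method == True:
--         # \r is added to txt at this point and needs to be removed
--         new_method_txt = new_txt.rstrip() + "()"
--         return new_method_txt
--     else:
--         return new_txt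
-- ===== SOURCE B (Python) =====
-- def _piece(flag, word):
--     if flag == "upper":
--         return word[:1].upper() + word[1:].lower()
--     if flag == "lower":
--         return word.lower()
--     return ""
--
--
-- def combined_string(txt, initial_case, is_method):
--     first, *rest = txt.split(' ')
--     s = "".join([_piece(initial_case, first)] + [_piece("upper", w) for w in rest])
--     if is_method == True:
--         return s.rstrip() + "()"
--     return s
-- ===== Notes on version B (the rewrite author's own statement) =====
-- stated objective: idiomatic
-- what changed: Replaced A's character-by-character flag state machine with splitting on ' ', capitalizing/lowering each word (first word per initial_case, later words capitalized), and joining the pieces once.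
import Mathlib
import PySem

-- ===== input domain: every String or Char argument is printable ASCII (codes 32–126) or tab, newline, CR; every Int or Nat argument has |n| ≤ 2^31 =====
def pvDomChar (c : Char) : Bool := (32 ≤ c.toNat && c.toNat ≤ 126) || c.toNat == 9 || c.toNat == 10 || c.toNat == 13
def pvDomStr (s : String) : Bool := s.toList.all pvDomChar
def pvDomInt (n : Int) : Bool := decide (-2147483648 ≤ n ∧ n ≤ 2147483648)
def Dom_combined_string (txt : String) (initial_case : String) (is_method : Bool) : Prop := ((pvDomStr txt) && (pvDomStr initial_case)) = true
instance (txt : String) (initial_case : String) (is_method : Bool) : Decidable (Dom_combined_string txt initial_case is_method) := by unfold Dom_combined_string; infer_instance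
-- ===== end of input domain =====

-- B is an idiomatic word-by-word rewrite (split on ' ', capitalize each piece, join) of A's
-- character-by-character flag machine; same return value everywhere.

-- ===== PORT A =====
-- A's loop: state is (flag, new_txt); each character updates it exactly as in the Python.
def pvStepA (st : String × List Char) (letter : Char) : String × List Char :=
  if letter = ' ' then ("upper", st.2)
  else if st.1 = "lower" then (st.1, st.2 ++ [PySem.Chars.lowerChar letter])
  else if st.1 = "upper" then ("lower", st.2 ++ [PySem.Chars.upperChar letter])
  else st

def combined_string (txt : String) (initial_case : String) (is_method : Bool) : String :=
  let r := txt.toList.foldl pvStepA (initial_case, [])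
  if is_method = true then String.mk (PySem.Chars.rstrip r.2 ++ ['(', ')'])
  else String.mk r.2

-- ===== PORT B =====
-- _piece(flag, word) of Source B
def pvPiece (flag : String) (word : List Char) : List Char :=
  if flag = "upper" then PySem.Chars.upper (word.take 1) ++ PySem.Chars.lower (word.drop 1)
  else if flag = "lower" then PySem.Chars.lower word
  else []

def combined_string_alt (txt : String) (initial_case : String) (is_method : Bool) : String :=
  match PySem.Chars.splitOn txt.toList [' '] with
  | [] => ""  -- unreachable: str.split never returns an empty list
  | first :: rest =>
    let s := PySem.Chars.join [] (pvPiece initial_case first :: rest.map (pvPiece "upper"))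
    if is_method = true then String.mk (PySem.Chars.rstrip s ++ ['(', ')'])
    else String.mk s

-- ===== PRECONDITION & SPEC =====
def Spec_combined_string (txt : String) (initial_case : String) (is_method : Bool) (out : String) : Prop := out = combined_string_alt txt initial_case is_method
instance (txt : String) (initial_case : String) (is_method : Bool) (out : String) : Decidable (Spec_combined_string txt initial_case is_method out) := by unfold Spec_combined_string; infer_instance

-- ===== CLAIM (what is proved, stated in full; the proofs are below) =====
def Claim_equal_combined_string : Prop := ∀ (txt : String) (initial_case : String) (is_method : Bool), Dom_combined_string txt initial_case is_method → Spec_combined_string txt initial_case is_method (combined_string txt initial_case is_method)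

-- ===== LEMMAS AND PROOFS =====

-- reference split on a single space: (first word, remaining words)
def pvSplit : List Char → List Char × List (List Char)
  | [] => ([], [])
  | c :: rest =>
    let p := pvSplit rest
    if c = ' ' then ([], p.1 :: p.2) else (c :: p.1, p.2)

lemma pvSplitOn_go_eq (l : List Char) : ∀ (fuel : Nat) (cur : List Char) (acc : List (List Char)),
    l.length ≤ fuel →
    PySem.Chars.splitOn.go [' '] fuel l cur acc
      = acc.reverse ++ (cur.reverse ++ (pvSplit l).1) :: (pvSplit l).2 := by
  induction l with
  | nil =>
    intro fuel cur acc _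
    cases fuel <;> simp [PySem.Chars.splitOn.go, pvSplit]
  | cons c rest ih =>
    intro fuel cur acc hle
    cases fuel with
    | zero => simp at hle
    | succ f =>
      rw [PySem.Chars.splitOn.go]
      by_cases hc : c = ' '
      · subst hc
        rw [if_pos (by simp [List.isPrefixOf])]
        have hd : List.drop [' '].length (' ' :: rest) = rest := by simp
        rw [hd, ih f [] (cur.reverse :: acc) (by simpa using hle)]
        simp [pvSplit]
      · rw [if_neg (by simp [List.isPrefixOf]; exact fun h => (hc h.symm).elim)]
        rw [ih f (c :: cur) acc (by simpa using Nat.le_of_succ_le_succ hle)]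
        simp [pvSplit, hc]

lemma pvSplitOn_eq (cs : List Char) :
    PySem.Chars.splitOn cs [' '] = (pvSplit cs).1 :: (pvSplit cs).2 := by
  rw [PySem.Chars.splitOn, pvSplitOn_go_eq cs (cs.length + 1) [] [] (by omega)]
  simp

lemma pvLoopA (cs : List Char) : ∀ (flag : String) (acc : List Char),
    (cs.foldl pvStepA (flag, acc)).2
      = acc ++ pvPiece flag (pvSplit cs).1 ++ ((pvSplit cs).2.map (pvPiece "upper")).flatten := by
  induction cs with
  | nil =>
    intro flag acc
    by_cases h1 : flag = "upper" <;> by_cases h2 : flag = "lower" <;>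
      simp [pvPiece, pvSplit, h1, h2, PySem.Chars.lower, PySem.Chars.upper]
  | cons c rest ih =>
    intro flag acc
    by_cases hc : c = ' '
    · subst hc
      have hstep : pvStepA (flag, acc) ' ' = ("upper", acc) := by simp [pvStepA]
      rw [List.foldl_cons, hstep, ih "upper" acc]
      by_cases h1 : flag = "upper" <;> by_cases h2 : flag = "lower" <;>
        simp [pvPiece, pvSplit, h1, h2, PySem.Chars.lower, PySem.Chars.upper]
    · by_cases h2 : flag = "lower"
      · subst h2
        have hstep : pvStepA ("lower", acc) c = ("lower", acc ++ [PySem.Chars.lowerChar c]) := by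
          simp [pvStepA, hc]
        rw [List.foldl_cons, hstep, ih "lower" (acc ++ [PySem.Chars.lowerChar c])]
        simp [pvPiece, pvSplit, hc, PySem.Chars.lower]
      · by_cases h1 : flag = "upper"
        · subst h1
          have hstep : pvStepA ("upper", acc) c = ("lower", acc ++ [PySem.Chars.upperChar c]) := by
            simp [pvStepA, hc]
          rw [List.foldl_cons, hstep, ih "lower" (acc ++ [PySem.Chars.upperChar c])]
          simp [pvPiece, pvSplit, hc, PySem.Chars.lower, PySem.Chars.upper]
        · have hstep : pvStepA (flag, acc) c = (flag, acc) := by simp [pvStepA, hc, h1, h2]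
          rw [List.foldl_cons, hstep, ih flag acc]
          simp [pvPiece, pvSplit, hc, h1, h2]

lemma pvJoin_empty_sep (parts : List (List Char)) :
    PySem.Chars.join [] parts = parts.flatten := by
  induction parts with
  | nil => rfl
  | cons a l ih => cases l <;> simp_all [PySem.Chars.join, List.intercalate, List.intersperse]

lemma pvBodies_eq (txt initial_case : String) :
    (txt.toList.foldl pvStepA (initial_case, [])).2
      = PySem.Chars.join []
          (pvPiece initial_case (pvSplit txt.toList).1
            :: ((pvSplit txt.toList).2.map (pvPiece "upper"))) := by
  rw [pvLoopA txt.toList initial_case [], pvJoin_empty_sep]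
  simp

-- ===== VERDICT (by name: the statement is the Claim_ definition above) =====
theorem combined_string_spec : Claim_equal_combined_string := by
  intro txt initial_case is_method _
  unfold Spec_combined_string combined_string combined_string_alt
  rw [pvSplitOn_eq]
  dsimp only
  rw [pvBodies_eq txt initial_case]
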